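-- pv_equiv track=rewrite | github.com/Arthurnevs/Atividades-LP1 | E7-master/E7-master/verifica_esteira/verifica.py | verifica_esteira
-- ===== SOURCE A (Python) =====
-- def verifica_esteira(l1,l2):
--
--   aux = []
--
--   for i in range(len(l2)):
--     for j in range(len(l1)):
--       if l2[i] == l1[j]:
--         aux.append(j)
--         break
--
--   if len(l2) != len(aux):
-- 	  return False
--
--   e_crescente = True
--   for i in range(len(aux)-1):
--     if aux[i] > aux[i+1]:
--       e_crescente = False
--       break
--     else:
--       e_crescente = True
--
--   return e_crescente
-- ===== SOURCE B (Python) =====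
-- def verifica_esteira(l1, l2):
--     prev = -1
--     for x in l2:
--         try:
--             idx = l1.index(x)
--         except ValueError:
--             return False
--         if idx < prev:
--             return False
--         prev = idx
--     return True
-- ===== Notes on version B (the rewrite author's own statement) =====
-- stated objective: simpler
-- what changed: Single pass over l2 with a running previous-index accumulator and early returns on a missing element or a decreasing index, using l1.index instead of materializing the aux index list and rescanning it for monotonicity.
import Mathlib
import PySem

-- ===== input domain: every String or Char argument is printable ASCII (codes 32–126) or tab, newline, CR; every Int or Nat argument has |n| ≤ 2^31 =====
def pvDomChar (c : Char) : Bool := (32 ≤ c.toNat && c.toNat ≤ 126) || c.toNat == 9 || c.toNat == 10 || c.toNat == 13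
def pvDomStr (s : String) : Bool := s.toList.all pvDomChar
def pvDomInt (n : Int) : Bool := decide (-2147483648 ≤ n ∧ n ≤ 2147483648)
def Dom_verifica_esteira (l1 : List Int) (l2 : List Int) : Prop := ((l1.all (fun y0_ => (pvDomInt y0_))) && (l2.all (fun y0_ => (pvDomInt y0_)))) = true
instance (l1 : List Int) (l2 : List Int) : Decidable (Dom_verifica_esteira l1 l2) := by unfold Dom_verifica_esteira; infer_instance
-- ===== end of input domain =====

-- B is a single pass over l2 with a running previous-index accumulator (no intermediate index list); same return value as A.

-- ===== PORT A =====
-- inner 'for j in range(len(l1)): if x == l1[j]: append j; break' — scans l1 carrying the counter j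
def pvInnerFind (x : Int) (l1 : List Int) (j : Nat) : Option Nat :=
  match l1 with
  | [] => none
  | y :: rest => if x = y then some j else pvInnerFind x rest (j + 1)

-- outer loop building aux (append on a found first index, nothing otherwise)
def pvBuildAux (l1 : List Int) (l2 : List Int) : List Nat :=
  match l2 with
  | [] => []
  | x :: rest =>
    match pvInnerFind x l1 0 with
    | some j => j :: pvBuildAux l1 rest
    | none => pvBuildAux l1 rest

-- 'for i in range(len(aux)-1): if aux[i] > aux[i+1]: False; break else True'
def pvCresc (aux : List Nat) : Bool :=
  match aux with
  | a :: b :: rest => if a > b then false else pvCresc (b :: rest)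
  | _ => true

def verifica_esteira (l1 : List Int) (l2 : List Int) : Bool :=
  let aux := pvBuildAux l1 l2
  if l2.length ≠ aux.length then false
  else pvCresc aux

-- ===== PORT B =====
def pvAltLoop (l1 : List Int) (prev : Int) (l2 : List Int) : Bool :=
  match l2 with
  | [] => true
  | x :: rest =>
    match PySem.List.index? l1 x with
    | none => false
    | some i => if (i : Int) < prev then false else pvAltLoop l1 (i : Int) rest

def verifica_esteira_alt (l1 : List Int) (l2 : List Int) : Bool :=
  pvAltLoop l1 (-1) l2

-- ===== PRECONDITION & SPEC =====
def Spec_verifica_esteira (l1 : List Int) (l2 : List Int) (out : Bool) : Prop := out = verifica_esteira_alt l1 l2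
instance (l1 : List Int) (l2 : List Int) (out : Bool) : Decidable (Spec_verifica_esteira l1 l2 out) := by unfold Spec_verifica_esteira; infer_instance

-- ===== CLAIM (what is proved, stated in full; the proofs are below) =====
def Claim_equal_verifica_esteira : Prop := ∀ (l1 : List Int) (l2 : List Int), Dom_verifica_esteira l1 l2 → Spec_verifica_esteira l1 l2 (verifica_esteira l1 l2)

-- ===== LEMMAS AND PROOFS =====

def pvAllFound (l1 : List Int) (l2 : List Int) : Bool := l2.all (fun x => x ∈ l1)

def pvCresc' (prev : Int) (aux : List Nat) : Bool :=
  match aux with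
  | [] => true
  | a :: rest => if prev > (a : Int) then false else pvCresc' (a : Int) rest

theorem pvInnerFind_shift (x : Int) (l1 : List Int) (j : Nat) :
    pvInnerFind x l1 j = (PySem.List.index? l1 x).map (· + j) := by
  induction l1 generalizing j with
  | nil => simp [pvInnerFind, PySem.List.index?_eq_idxOf?]
  | cons y rest ih =>
    by_cases h : x = y
    · subst h
      rw [pvInnerFind, if_pos rfl, PySem.List.index?_cons_self]
      simp
    · rw [pvInnerFind, if_neg h, ih,
        show PySem.List.index? (y :: rest) x = (PySem.List.index? rest x).map (· + 1) from
          PySem.List.index?_cons_of_ne _ (fun (e : y = x) => h (Eq.symm e))]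
      cases hr : PySem.List.index? rest x <;> simp
      omega

theorem pvInnerFind_eq_index? (x : Int) (l1 : List Int) :
    pvInnerFind x l1 0 = PySem.List.index? l1 x := by
  rw [pvInnerFind_shift]
  cases h : PySem.List.index? l1 x <;> simp

theorem pvBuildAux_eq (l1 : List Int) (l2 : List Int) :
    pvBuildAux l1 l2 = l2.filterMap (fun x => PySem.List.index? l1 x) := by
  induction l2 with
  | nil => simp [pvBuildAux]
  | cons x rest ih =>
    rw [pvBuildAux, pvInnerFind_eq_index?, List.filterMap_cons]
    cases h : PySem.List.index? l1 x <;> simp [ih]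

theorem pvBuildAux_le (l1 : List Int) (l2 : List Int) :
    (pvBuildAux l1 l2).length ≤ l2.length := by
  induction l2 with
  | nil => simp [pvBuildAux]
  | cons x rest ih =>
    rw [pvBuildAux]
    cases pvInnerFind x l1 0 <;> simp <;> omega

theorem pvBuildAux_len (l1 : List Int) (l2 : List Int) :
    (l2.length = (pvBuildAux l1 l2).length) ↔ pvAllFound l1 l2 = true := by
  induction l2 with
  | nil => simp [pvBuildAux, pvAllFound]
  | cons x rest ih =>
    rw [pvBuildAux, pvInnerFind_eq_index?]
    cases h : PySem.List.index? l1 x with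
    | none =>
      have hx : x ∉ l1 := (PySem.List.index?_eq_none_iff l1 x).mp h
      have hle := pvBuildAux_le l1 rest
      simp only [pvAllFound, List.all_cons, List.length_cons]
      constructor
      · intro he; omega
      · intro he; simp [hx] at he
    | some i =>
      have hx : x ∈ l1 := by
        have hs : (PySem.List.index? l1 x).isSome := by rw [h]; rfl
        exact (PySem.List.index?_isSome_iff l1 x).mp hs
      simp only [pvAllFound, List.all_cons, List.length_cons, List.length_cons]
      simpa [hx, pvAllFound] using ih

theorem pvCresc'_nat (rest : List Nat) (a : Nat) :
    pvCresc' (a : Int) rest = pvCresc (a :: rest) := by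
  induction rest generalizing a with
  | nil => simp [pvCresc', pvCresc]
  | cons b r ih =>
    rw [pvCresc', pvCresc]
    by_cases h : a > b
    · rw [if_pos (by exact_mod_cast h), if_pos h]
    · rw [if_neg (by exact_mod_cast h), if_neg h, ih]

theorem pvCresc'_neg (aux : List Nat) (prev : Int) (h : prev < 0) :
    pvCresc' prev aux = pvCresc aux := by
  cases aux with
  | nil => rfl
  | cons a rest =>
    rw [pvCresc', if_neg (by omega), pvCresc'_nat]

theorem pvAltLoop_char (l1 : List Int) (l2 : List Int) (prev : Int) :
    pvAltLoop l1 prev l2 =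
      (pvAllFound l1 l2 && pvCresc' prev (l2.filterMap (fun x => PySem.List.index? l1 x))) := by
  induction l2 generalizing prev with
  | nil => simp [pvAltLoop, pvAllFound, pvCresc']
  | cons x rest ih =>
    rw [pvAltLoop, List.filterMap_cons]
    cases h : PySem.List.index? l1 x with
    | none =>
      have hx : x ∉ l1 := (PySem.List.index?_eq_none_iff l1 x).mp h
      simp [pvAllFound, hx]
    | some i =>
      have hx : x ∈ l1 := by
        have hs : (PySem.List.index? l1 x).isSome := by rw [h]; rfl
        exact (PySem.List.index?_isSome_iff l1 x).mp hs
      by_cases hlt : (i : Int) < prev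
      · simp only []
        rw [if_pos hlt]
        simp [pvCresc', hlt]
      · simp only []
        rw [if_neg hlt, ih]
        simp [pvAllFound, hx, pvCresc', hlt]

-- ===== VERDICT (by name: the statement is the Claim_ definition above) =====
theorem verifica_esteira_spec : Claim_equal_verifica_esteira := by
  intro l1 l2 _
  unfold Spec_verifica_esteira verifica_esteira verifica_esteira_alt
  rw [pvAltLoop_char, pvCresc'_neg _ _ (by norm_num), ← pvBuildAux_eq]
  by_cases h : l2.length = (pvBuildAux l1 l2).length
  · simp [h, (pvBuildAux_len l1 l2).mp h]
  · cases hf : pvAllFound l1 l2 with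
    | false => simp [h]
    | true => exact absurd ((pvBuildAux_len l1 l2).mpr hf) h
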